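-- pv_equiv track=rewrite | github.com/selco13/HLNBot | orders.py | get_suitable_division_templates
-- ===== SOURCE A (Python) =====
-- from typing import Dict, List, Optional, Any, Tuple, Union, Set
--
-- def get_suitable_division_templates(division: str, major_order_title: str) -> List[str]:
--     """Get division order templates that align with the major order"""
--     if division not in DIVISION_ORDER_TEMPLATES:
--         return []
--
--     all_templates = DIVISION_ORDER_TEMPLATES[division]
--
--     # Define thematic alignment between major orders and division templates
--     # This is a heuristic approach - you might want to define this mapping more explicitly
--     if "Security" in major_order_title or "Piracy" in major_order_title:
--         return [t for t in all_templates if any(keyword in t for keyword in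
--                                               ["Security", "Offensive", "Crackdown", "Training"])]
--
--     elif "Economic" in major_order_title or "Trade" in major_order_title:
--         return [t for t in all_templates if any(keyword in t for keyword in
--                                               ["Trade", "Economic", "Cargo", "Mining", "Salvage"])]
--
--     elif "Recruitment" in major_order_title or "Outreach" in major_order_title:
--         return [t for t in all_templates if any(keyword in t for keyword in
--                                               ["Outreach", "Training", "Focus"])]
--
--     # Default case: return all templates
--     return all_templates
--
-- DIVISION_ORDER_TEMPLATES = {
--     "Tactical": [
--         "Security Crackdown",
--         "Pilot Training",
--         "Gunnery Training",
--         "Marine Offensive",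
--         "Anti-Piracy Offensive",
--         "Trade Security"
--     ],
--     "Operations": [
--         "Salvage Surge",
--         "Cargo Conglomerate",
--         "Mining Training",
--         "FOB Assertion",
--         "Free Trade Focus",
--         "Economic Boom"
--     ],
--     "Support": [
--         "Medical Mandate",
--         "Fuel Fiasco",
--         "Logistic Focus",
--         "Civilian Outreach"
--     ]
-- }
-- ===== SOURCE B (Python) =====
-- DIVISION_ORDER_TEMPLATES = {
--     "Tactical": [
--         "Security Crackdown",
--         "Pilot Training",
--         "Gunnery Training",
--         "Marine Offensive",
--         "Anti-Piracy Offensive",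
--         "Trade Security"
--     ],
--     "Operations": [
--         "Salvage Surge",
--         "Cargo Conglomerate",
--         "Mining Training",
--         "FOB Assertion",
--         "Free Trade Focus",
--         "Economic Boom"
--     ],
--     "Support": [
--         "Medical Mandate",
--         "Fuel Fiasco",
--         "Logistic Focus",
--         "Civilian Outreach"
--     ]
-- }
--
-- _THEME_KEYWORDS = [
--     ["Security", "Offensive", "Crackdown", "Training"],
--     ["Trade", "Economic", "Cargo", "Mining", "Salvage"],
--     ["Outreach", "Training", "Focus"],
-- ]
--
-- # flat trigger-word scan, listed in branch-priority order: first word found in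
-- # the title decides the theme index
-- _TRIGGERS = [("Security", 0), ("Piracy", 0), ("Economic", 1), ("Trade", 1),
--              ("Recruitment", 2), ("Outreach", 2)]
--
-- # every themed answer precomputed once at import time: no filtering at call time
-- _PRECOMPUTED = {}
-- for _div, _templates in DIVISION_ORDER_TEMPLATES.items():
--     for _i, _keywords in enumerate(_THEME_KEYWORDS):
--         _PRECOMPUTED[(_div, _i)] = [t for t in _templates
--                                     if any(k in t for k in _keywords)]
--
--
-- def get_suitable_division_templates(division, major_order_title):
--     templates = DIVISION_ORDER_TEMPLATES.get(division)
--     if templates is None: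
--         return []
--     theme = next((i for w, i in _TRIGGERS if w in major_order_title), None)
--     if theme is None:
--         return templates
--     return _PRECOMPUTED[(division, theme)]
-- ===== Notes on version B (the rewrite author's own statement) =====
-- stated objective: alternative
-- what changed: All themed answers are precomputed once into a table keyed by (division, theme index); at call time B only scans a flat priority-ordered trigger-word list to pick the theme and returns the precomputed list, doing no template filtering per call.
import Mathlib
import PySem

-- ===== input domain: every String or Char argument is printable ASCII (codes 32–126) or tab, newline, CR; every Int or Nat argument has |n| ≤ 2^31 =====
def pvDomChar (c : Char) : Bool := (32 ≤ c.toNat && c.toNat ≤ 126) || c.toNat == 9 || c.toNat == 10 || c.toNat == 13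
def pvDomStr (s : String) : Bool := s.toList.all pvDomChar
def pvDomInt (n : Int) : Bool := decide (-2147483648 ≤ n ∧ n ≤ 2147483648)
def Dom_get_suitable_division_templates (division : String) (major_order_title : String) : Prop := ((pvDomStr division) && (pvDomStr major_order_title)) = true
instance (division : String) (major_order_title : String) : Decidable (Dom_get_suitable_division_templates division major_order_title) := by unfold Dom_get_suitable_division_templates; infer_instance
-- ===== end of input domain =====

-- B precomputes every themed answer once into a table keyed by (division, theme index)
-- and at call time only picks the theme with a flat priority-ordered trigger-word scan
-- (objective: alternative decomposition). Same return values.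

-- ===== PORT A =====
def DIVISION_ORDER_TEMPLATES : PySem.Dict String (List String) :=
  PySem.Dict.ofList
    [("Tactical", ["Security Crackdown", "Pilot Training", "Gunnery Training",
                   "Marine Offensive", "Anti-Piracy Offensive", "Trade Security"]),
     ("Operations", ["Salvage Surge", "Cargo Conglomerate", "Mining Training",
                     "FOB Assertion", "Free Trade Focus", "Economic Boom"]),
     ("Support", ["Medical Mandate", "Fuel Fiasco", "Logistic Focus", "Civilian Outreach"])]

def get_suitable_division_templates (division : String) (major_order_title : String) : List String :=
  if ¬ (PySem.Dict.contains DIVISION_ORDER_TEMPLATES division = true) then []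
  else
    let all_templates := PySem.Dict.getD DIVISION_ORDER_TEMPLATES division []
    if PySem.Str.isIn "Security" major_order_title || PySem.Str.isIn "Piracy" major_order_title then
      all_templates.filter (fun t =>
        (["Security", "Offensive", "Crackdown", "Training"]).any (fun keyword => PySem.Str.isIn keyword t))
    else if PySem.Str.isIn "Economic" major_order_title || PySem.Str.isIn "Trade" major_order_title then
      all_templates.filter (fun t =>
        (["Trade", "Economic", "Cargo", "Mining", "Salvage"]).any (fun keyword => PySem.Str.isIn keyword t))
    else if PySem.Str.isIn "Recruitment" major_order_title || PySem.Str.isIn "Outreach" major_order_title then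
      all_templates.filter (fun t =>
        (["Outreach", "Training", "Focus"]).any (fun keyword => PySem.Str.isIn keyword t))
    else
      all_templates

-- ===== PORT B =====
def THEME_KEYWORDS : List (List String) :=
  [["Security", "Offensive", "Crackdown", "Training"],
   ["Trade", "Economic", "Cargo", "Mining", "Salvage"],
   ["Outreach", "Training", "Focus"]]

def TRIGGERS : List (String × Int) :=
  [("Security", 0), ("Piracy", 0), ("Economic", 1), ("Trade", 1),
   ("Recruitment", 2), ("Outreach", 2)]

-- the import-time precomputation loop of Source B: for each division and each theme
-- index, store the filtered template list
def PRECOMPUTED : PySem.Dict (String × Int) (List String) :=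
  (PySem.Dict.items DIVISION_ORDER_TEMPLATES).foldl
    (fun d p =>
      (PySem.List.enumerate THEME_KEYWORDS).foldl
        (fun d q =>
          PySem.Dict.insert d (p.1, q.1)
            (p.2.filter (fun t => q.2.any (fun k => PySem.Str.isIn k t))))
        d)
    PySem.Dict.empty

-- Source B's 'next((i for w, i in _TRIGGERS if w in major_order_title), None)'
def pvFirstTheme (major_order_title : String) : List (String × Int) → Option Int
  | [] => none
  | (w, i) :: rest =>
    if PySem.Str.isIn w major_order_title then some i
    else pvFirstTheme major_order_title rest

def get_suitable_division_templates_alt (division : String) (major_order_title : String) : List String :=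
  match PySem.Dict.get? DIVISION_ORDER_TEMPLATES division with
  | none => []
  | some templates =>
    match pvFirstTheme major_order_title TRIGGERS with
    | none => templates
    | some theme => PySem.Dict.getD PRECOMPUTED (division, theme) []
      -- the key (division, theme) is always present: division is a key of
      -- DIVISION_ORDER_TEMPLATES and theme ∈ {0,1,2}, so Python's d[k] never raises

-- ===== PRECONDITION & SPEC =====
def Spec_get_suitable_division_templates (division : String) (major_order_title : String) (out : List String) : Prop := out = get_suitable_division_templates_alt division major_order_title
instance (division : String) (major_order_title : String) (out : List String) : Decidable (Spec_get_suitable_division_templates division major_order_title out) := by unfold Spec_get_suitable_division_templates; infer_instance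

-- ===== CLAIM =====
def Claim_equal_get_suitable_division_templates : Prop := ∀ (division : String) (major_order_title : String), Dom_get_suitable_division_templates division major_order_title → Spec_get_suitable_division_templates division major_order_title (get_suitable_division_templates division major_order_title)

-- ===== LEMMAS AND PROOFS =====


-- the dict constant, evaluated once to its literal item list (used in the no-division case)
theorem pvItems :
    DIVISION_ORDER_TEMPLATES.items =
      [("Tactical", ["Security Crackdown", "Pilot Training", "Gunnery Training",
                     "Marine Offensive", "Anti-Piracy Offensive", "Trade Security"]),
       ("Operations", ["Salvage Surge", "Cargo Conglomerate", "Mining Training",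
                       "FOB Assertion", "Free Trade Focus", "Economic Boom"]),
       ("Support", ["Medical Mandate", "Fuel Fiasco", "Logistic Focus", "Civilian Outreach"])] := by
  decide

-- ===== VERDICT =====
set_option maxHeartbeats 4000000 in
theorem get_suitable_division_templates_spec : Claim_equal_get_suitable_division_templates := by
  intro division major_order_title _
  unfold Spec_get_suitable_division_templates
  unfold get_suitable_division_templates get_suitable_division_templates_alt
  by_cases h1 : "Tactical" = division
  · subst h1
    have hc : PySem.Dict.contains DIVISION_ORDER_TEMPLATES "Tactical" = true := by decide
    simp only [TRIGGERS, pvFirstTheme]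
    split_ifs <;> first | decide | (exfalso; simp_all)
  · have e1 : ("Tactical" == division) = false := beq_eq_false_iff_ne.mpr h1
    by_cases h2 : "Operations" = division
    · subst h2
      have hc : PySem.Dict.contains DIVISION_ORDER_TEMPLATES "Operations" = true := by decide
      simp only [TRIGGERS, pvFirstTheme]
      split_ifs <;> first | decide | (exfalso; simp_all)
    · have e2 : ("Operations" == division) = false := beq_eq_false_iff_ne.mpr h2
      by_cases h3 : "Support" = division
      · subst h3
        have hc : PySem.Dict.contains DIVISION_ORDER_TEMPLATES "Support" = true := by decide
        simp only [TRIGGERS, pvFirstTheme]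
        split_ifs <;> first | decide | (exfalso; simp_all)
      · have e3 : ("Support" == division) = false := beq_eq_false_iff_ne.mpr h3
        simp [PySem.Dict.contains, PySem.Dict.get?, pvItems, List.any, List.find?, e1, e2, e3]
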